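-- pv_equiv track=rewrite | github.com/asqum/PYQUM | TEST/FACE/pyqum/directive/code/QubitFrequency.py | colect_cluster
-- ===== SOURCE A (Python) =====
-- def colect_cluster(labels,mode):
--     peak_susp_idx = []
--     nope_idx = []
--
--     rec = simple_sort(labels,mode) #由少排到多
--
--     target_k = rec[0] #最遠群
--     env = rec[-1] #主群
--
--
--     for i in range(len(labels)):
--         if labels[i] == target_k[0]: #最遠群保留
--             peak_susp_idx.append(i)
--         if labels[i] == env[0]:  #主群計算中心
--             nope_idx.append(i)
--
--     return peak_susp_idx, nope_idx
--
-- def simple_sort(labels,mode):  #input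
--     zero = 0
--     _one = 0
--     def Key(elem):
--         return elem[1]
--
--     if mode == 'db':
--         for i in range(len(labels)):
--             if labels[i]==-1 :
--                 _one += 1
--             else:
--                 zero += 1
--         rec = [[0,zero],[-1,_one]]
--     else:
--         for i in range(len(labels)):
--             if labels[i]==1 :
--                 _one += 1
--             else:
--                 zero += 1
--         rec = [[0,zero],[1,_one]]
--     rec.sort(key = Key) #以數量由小到大排序
--
--     return rec
-- ===== SOURCE B (Python) =====
-- def colect_cluster(labels, mode):
--     special = -1 if mode == 'db' else 1
--     idx0 = []
--     idxsp = []
--     for i, x in enumerate(labels):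
--         if x == 0:
--             idx0.append(i)
--         elif x == special:
--             idxsp.append(i)
--     sp = len(idxsp)
--     if len(labels) - sp <= sp:
--         return idx0, idxsp
--     return idxsp, idx0
-- ===== Notes on version B (the rewrite author's own statement) =====
-- stated objective: simpler
-- what changed: Inlined simple_sort away: one elif pass over enumerate(labels) builds the label-0 and special-label index lists directly, and a single length comparison (len-sp <= sp, preserving the stable sort's tie direction) picks which list is the peak group, replacing the count loop, the rec list and its sort, and the second double-test scan.
import Mathlib
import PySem

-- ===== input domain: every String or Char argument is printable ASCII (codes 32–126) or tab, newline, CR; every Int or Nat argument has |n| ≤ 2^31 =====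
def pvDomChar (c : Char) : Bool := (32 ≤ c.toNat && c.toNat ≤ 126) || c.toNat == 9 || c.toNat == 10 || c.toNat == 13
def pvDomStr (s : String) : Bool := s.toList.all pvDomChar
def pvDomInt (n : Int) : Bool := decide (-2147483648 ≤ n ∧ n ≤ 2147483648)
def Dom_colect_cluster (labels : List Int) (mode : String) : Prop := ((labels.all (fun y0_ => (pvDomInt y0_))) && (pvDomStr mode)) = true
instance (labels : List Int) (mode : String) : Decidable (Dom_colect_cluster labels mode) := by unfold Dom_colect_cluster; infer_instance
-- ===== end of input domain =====

-- B replaces simple_sort's count-then-sort with one elif pass building the two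
-- index lists directly and a single length comparison choosing peak vs main
-- group (objective: simpler; same O(n) cost).


-- ===== PORT A =====
-- Python inner lists [label, count] have fixed length 2, ported as Int × Int.
def simple_sort (labels : List Int) (mode : String) : List (Int × Int) :=
  if mode == "db" then
    let c := (PySem.List.pyRange 0 labels.length 1).foldl
      (fun (zo : Int × Int) i =>
        if PySem.List.pyGetD labels i 0 == -1 then (zo.1, zo.2 + 1) else (zo.1 + 1, zo.2))
      (0, 0)
    PySem.List.sorted [((0 : Int), c.1), ((-1 : Int), c.2)] (fun p => p.2)
  else
    let c := (PySem.List.pyRange 0 labels.length 1).foldl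
      (fun (zo : Int × Int) i =>
        if PySem.List.pyGetD labels i 0 == 1 then (zo.1, zo.2 + 1) else (zo.1 + 1, zo.2))
      (0, 0)
    PySem.List.sorted [((0 : Int), c.1), ((1 : Int), c.2)] (fun p => p.2)

def colect_cluster (labels : List Int) (mode : String) : List Int × List Int :=
  let rec_ := simple_sort labels mode
  let target_k := PySem.List.pyGetD rec_ 0 (0, 0)
  let env := PySem.List.pyGetD rec_ (-1) (0, 0)
  (PySem.List.pyRange 0 labels.length 1).foldl
    (fun (pn : List Int × List Int) i =>
      let x := PySem.List.pyGetD labels i 0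
      (if x = target_k.1 then pn.1 ++ [i] else pn.1,
       if x = env.1 then pn.2 ++ [i] else pn.2))
    ([], [])

-- ===== PORT B =====
def colect_cluster_alt (labels : List Int) (mode : String) : List Int × List Int :=
  let special : Int := if mode == "db" then -1 else 1
  let acc := (PySem.List.enumerate labels 0).foldl
    (fun (acc : List Int × List Int) ix =>
      if ix.2 = 0 then (acc.1 ++ [ix.1], acc.2)
      else if ix.2 = special then (acc.1, acc.2 ++ [ix.1])
      else acc)
    ([], [])
  let sp : Int := acc.2.length
  if (labels.length : Int) - sp ≤ sp then (acc.1, acc.2) else (acc.2, acc.1)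

-- ===== PRECONDITION & SPEC =====
def Spec_colect_cluster (labels : List Int) (mode : String) (out : List Int × List Int) : Prop := out = colect_cluster_alt labels mode
instance (labels : List Int) (mode : String) (out : List Int × List Int) : Decidable (Spec_colect_cluster labels mode out) := by unfold Spec_colect_cluster; infer_instance

-- ===== CLAIM (what is proved, stated in full; the proofs are below) =====
def Claim_equal_colect_cluster : Prop := ∀ (labels : List Int) (mode : String), Dom_colect_cluster labels mode → Spec_colect_cluster labels mode (colect_cluster labels mode)

-- ===== LEMMAS AND PROOFS =====

-- indices (as Ints) of the elements of labels equal to v, in order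
def pvIdx (labels : List Int) (v : Int) : List Int :=
  ((PySem.List.enumerate labels 0).filter (fun ix => ix.2 == v)).map (·.1)

theorem pvIdx_filter (l : List (Int × Int)) (u v : Int) (p q : List Int) :
    l.foldl
      (fun (pn : List Int × List Int) ix =>
        (if ix.2 = u then pn.1 ++ [ix.1] else pn.1,
         if ix.2 = v then pn.2 ++ [ix.1] else pn.2)) (p, q)
    = (p ++ (l.filter (fun ix => ix.2 == u)).map (·.1),
       q ++ (l.filter (fun ix => ix.2 == v)).map (·.1)) := by
  induction l generalizing p q with
  | nil => simp
  | cons a l ih =>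
    simp only [List.foldl_cons, List.filter_cons]
    rw [ih]
    by_cases hu : a.2 = u <;> by_cases hv : a.2 = v <;>
      simp [hu, hv] <;> split_ifs <;> simp_all

theorem pvIdx_filter_alt (l : List (Int × Int)) (s : Int) (hs : s ≠ 0) (p q : List Int) :
    l.foldl
      (fun (acc : List Int × List Int) ix =>
        if ix.2 = 0 then (acc.1 ++ [ix.1], acc.2)
        else if ix.2 = s then (acc.1, acc.2 ++ [ix.1])
        else acc) (p, q)
    = (p ++ (l.filter (fun ix => ix.2 == (0 : Int))).map (·.1),
       q ++ (l.filter (fun ix => ix.2 == s)).map (·.1)) := by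
  induction l generalizing p q with
  | nil => simp
  | cons a l ih =>
    simp only [List.foldl_cons, List.filter_cons]
    by_cases h0 : a.2 = 0
    · have hns : ¬ a.2 = s := by omega
      rw [if_pos h0, ih]
      simp [h0, hns]
      rw [if_neg (by omega)]
    · rw [if_neg h0]
      by_cases hsx : a.2 = s
      · rw [if_pos hsx, ih]; simp [h0, hsx]; rw [if_neg (by omega)]
      · rw [if_neg hsx, ih]; simp [h0, hsx]

theorem pvCount_fold (labels : List Int) (s : Int) (z o : Int) :
    labels.foldl
      (fun (zo : Int × Int) x => if x == s then (zo.1, zo.2 + 1) else (zo.1 + 1, zo.2)) (z, o)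
    = (z + (labels.countP (fun x => x != s) : Int),
       o + (labels.countP (fun x => x == s) : Int)) := by
  induction labels generalizing z o with
  | nil => simp
  | cons a l ih =>
    simp only [List.foldl_cons]
    by_cases h : (a == s) = true
    · rw [if_pos h, ih]
      have h' : (a != s) = false := by simp_all
      simp only [List.countP_cons, h, h', Prod.mk.injEq]
      constructor <;> push_cast <;> ring
    · rw [if_neg h, ih]
      have h' : (a != s) = true := by simp_all
      have h'' : (a == s) = false := by simp_all
      simp only [List.countP_cons, h', h'', Prod.mk.injEq]
      constructor <;> push_cast <;> ring

theorem pvCount_sum (labels : List Int) (s : Int) :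
    labels.countP (fun x => x != s) + labels.countP (fun x => x == s) = labels.length := by
  induction labels with
  | nil => simp
  | cons a l ih =>
    by_cases h : a = s <;> simp [List.countP_cons, h] <;> omega

theorem pvSorted_pair (a b : Int × Int) :
    PySem.List.sorted [a, b] (fun p => p.2)
      = if b.2 < a.2 then [b, a] else [a, b] := by
  split_ifs with h
  · exact PySem.List.sorted_eq_of_perm_of_pairwise_lt [a, b] [b, a] (fun p => p.2)
      (List.Perm.swap a b []) (by simpa using h)
  · exact PySem.List.sorted_eq_self_of_pairwise [a, b] (fun p => p.2)
      (by simpa using not_lt.mp h)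

theorem pvCountP_enumerate (labels : List Int) (st v : Int) :
    (PySem.List.enumerate labels st).countP (fun ix => ix.2 == v)
      = labels.countP (fun x => x == v) := by
  induction labels generalizing st with
  | nil => simp [PySem.List.enumerate_nil]
  | cons a l ih => simp [PySem.List.enumerate_cons, List.countP_cons, ih]

theorem pvIdx_length (labels : List Int) (v : Int) :
    (pvIdx labels v).length = labels.countP (fun x => x == v) := by
  unfold pvIdx
  rw [List.length_map, ← List.countP_eq_length_filter]
  exact pvCountP_enumerate labels 0 v

-- A's collecting loop over range(len(labels)) produces the two index lists
theorem pvA_loop (labels : List Int) (t e : Int) :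
    (PySem.List.pyRange 0 (labels.length : Int) 1).foldl
      (fun (pn : List Int × List Int) i =>
        let x := PySem.List.pyGetD labels i 0
        (if x = t then pn.1 ++ [i] else pn.1,
         if x = e then pn.2 ++ [i] else pn.2))
      ([], [])
    = (pvIdx labels t, pvIdx labels e) := by
  have hmap : PySem.List.pyRange 0 (labels.length : Int) 1
      = (PySem.List.enumerate labels 0).map (·.1) := by
    rw [PySem.List.map_fst_enumerate labels 0]; norm_num
  rw [hmap, List.foldl_map]
  rw [PySem.List.foldl_congr_mem _ _
    (fun (pn : List Int × List Int) ix =>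
      (if ix.2 = t then pn.1 ++ [ix.1] else pn.1,
       if ix.2 = e then pn.2 ++ [ix.1] else pn.2)) _ ?_]
  · simpa [pvIdx] using pvIdx_filter (PySem.List.enumerate labels 0) t e [] []
  · intro acc ix hix
    obtain ⟨k, hk, rfl⟩ := (PySem.List.mem_enumerate_iff labels 0 ix).mp hix
    simp [List.getD_eq_getElem?_getD, hk]

-- the core equality, for either special label s ≠ 0
theorem pvMain (labels : List Int) (s : Int) (hs : s ≠ 0) :
    (let rec_ := PySem.List.sorted
        [((0 : Int), ((labels.countP (fun x => x != s) : Nat) : Int)),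
         (s, ((labels.countP (fun x => x == s) : Nat) : Int))] (fun p => p.2)
     let target_k := PySem.List.pyGetD rec_ 0 ((0 : Int), (0 : Int))
     let env := PySem.List.pyGetD rec_ (-1) ((0 : Int), (0 : Int))
     (PySem.List.pyRange 0 (labels.length : Int) 1).foldl
        (fun (pn : List Int × List Int) i =>
          let x := PySem.List.pyGetD labels i 0
          (if x = target_k.1 then pn.1 ++ [i] else pn.1,
           if x = env.1 then pn.2 ++ [i] else pn.2))
        ([], []))
    = (let acc := (PySem.List.enumerate labels 0).foldl
        (fun (acc : List Int × List Int) ix =>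
          if ix.2 = 0 then (acc.1 ++ [ix.1], acc.2)
          else if ix.2 = s then (acc.1, acc.2 ++ [ix.1])
          else acc)
        ([], [])
       let sp : Int := acc.2.length
       if (labels.length : Int) - sp ≤ sp then (acc.1, acc.2) else (acc.2, acc.1)) := by
  have hB := pvIdx_filter_alt (PySem.List.enumerate labels 0) s hs [] []
  have hsum := pvCount_sum labels s
  rw [pvSorted_pair]
  simp only [hB, List.nil_append]
  by_cases h : ((labels.countP (fun x => x == s) : Nat) : Int)
      < ((labels.countP (fun x => x != s) : Nat) : Int)
  · rw [if_pos h]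
    have hord : ¬ ((labels.length : Int)
        - ((((PySem.List.enumerate labels 0).filter (fun ix => ix.2 == s)).map (·.1)).length : Int)
        ≤ ((((PySem.List.enumerate labels 0).filter (fun ix => ix.2 == s)).map (·.1)).length : Int)) := by
      have := pvIdx_length labels s
      unfold pvIdx at this
      rw [this]; push_cast; omega
    rw [if_neg hord]
    simp only [PySem.List.pyGetD_zero_cons]
    rw [show PySem.List.pyGetD
        [(s, ((labels.countP (fun x => x == s) : Nat) : Int)),
         ((0 : Int), ((labels.countP (fun x => x != s) : Nat) : Int))] (-1) ((0 : Int), (0 : Int))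
      = ((0 : Int), ((labels.countP (fun x => x != s) : Nat) : Int)) from by
        simp [PySem.List.pyGetD, PySem.List.pyGet?, PySem.List.pyIdx?]]
    rw [pvA_loop labels s 0]
    simp [pvIdx]
  · rw [if_neg h]
    have hord : ((labels.length : Int)
        - ((((PySem.List.enumerate labels 0).filter (fun ix => ix.2 == s)).map (·.1)).length : Int)
        ≤ ((((PySem.List.enumerate labels 0).filter (fun ix => ix.2 == s)).map (·.1)).length : Int)) := by
      have := pvIdx_length labels s
      unfold pvIdx at this
      rw [this]; push_cast; omega
    rw [if_pos hord]
    simp only [PySem.List.pyGetD_zero_cons]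
    rw [show PySem.List.pyGetD
        [((0 : Int), ((labels.countP (fun x => x != s) : Nat) : Int)),
         (s, ((labels.countP (fun x => x == s) : Nat) : Int))] (-1) ((0 : Int), (0 : Int))
      = (s, ((labels.countP (fun x => x == s) : Nat) : Int)) from by
        simp [PySem.List.pyGetD, PySem.List.pyGet?, PySem.List.pyIdx?]]
    rw [pvA_loop labels 0 s]
    simp [pvIdx]

-- ===== VERDICT (by name: the statement is the Claim_ definition above) =====
theorem colect_cluster_spec : Claim_equal_colect_cluster := by
  intro labels mode _
  unfold Spec_colect_cluster colect_cluster colect_cluster_alt simple_sort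
  by_cases hm : mode == "db"
  · simp only [hm, if_pos]
    rw [show PySem.List.pyRange 0 (labels.length : Int) 1
        = PySem.List.pyRange 0 (PySem.List.len labels) 1 from by simp]
    rw [PySem.List.foldl_pyRange_zero_pyGetD labels 0
      (fun (zo : Int × Int) x => if x == -1 then (zo.1, zo.2 + 1) else (zo.1 + 1, zo.2)) (0, 0),
      pvCount_fold labels (-1) 0 0]
    simpa using pvMain labels (-1) (by decide)
  · simp only [hm, if_neg, Bool.false_eq_true, ite_false]
    rw [show PySem.List.pyRange 0 (labels.length : Int) 1
        = PySem.List.pyRange 0 (PySem.List.len labels) 1 from by simp]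
    rw [PySem.List.foldl_pyRange_zero_pyGetD labels 0
      (fun (zo : Int × Int) x => if x == 1 then (zo.1, zo.2 + 1) else (zo.1 + 1, zo.2)) (0, 0),
      pvCount_fold labels 1 0 0]
    simpa using pvMain labels 1 (by decide)
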